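-- pv_equiv track=rewrite | github.com/navapbc/digital-service-orchestra | tests/skills/test_task_execution_template.py | _get_report_section
-- ===== SOURCE A (Python) =====
-- def _get_report_section(content: str) -> str:
--     """Extract the step 9 report output section from the template.
--
--     The report output section starts at the line containing 'Report output:'
--     and ends at the next heading or numbered step.
--     """
--     lines = content.splitlines()
--     in_section = False
--     section_lines: list[str] = []
--     for line in lines:
--         if "Report output:" in line:
--             in_section = True
--             section_lines.append(line)
--             continue
--         if in_section:
--             # Stop at the next heading or next numbered step
--             stripped = line.strip()
--             if stripped.startswith("#") or (
--                 stripped and stripped[0].isdigit() and "." in stripped[:4]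
--             ):
--                 break
--             section_lines.append(line)
--     return "\n".join(section_lines)
-- ===== SOURCE B (Python) =====
-- def _get_report_section(content: str) -> str:
--     """Find the section bounds first, then slice and join."""
--     lines = content.splitlines()
--     start = None
--     for i, line in enumerate(lines):
--         if "Report output:" in line:
--             start = i
--             break
--     if start is None:
--         return ""
--     n = 0
--     for line in lines[start + 1:]:
--         if "Report output:" not in line:
--             s = line.strip()
--             if s.startswith("#") or (s and s[0].isdigit() and "." in s[:4]):
--                 break
--         n += 1
--     return "\n".join(lines[start:start + 1 + n])
-- ===== Notes on version B (the rewrite author's own statement) =====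
-- stated objective: alternative
-- what changed: Replaced A's single stateful loop (in_section flag, accumulator list, break) by a find-bounds-then-slice decomposition: locate the first marker line, count the kept lines after it up to the first heading/numbered-step boundary (marker lines always kept), and join one slice of the line list.
import Mathlib
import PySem

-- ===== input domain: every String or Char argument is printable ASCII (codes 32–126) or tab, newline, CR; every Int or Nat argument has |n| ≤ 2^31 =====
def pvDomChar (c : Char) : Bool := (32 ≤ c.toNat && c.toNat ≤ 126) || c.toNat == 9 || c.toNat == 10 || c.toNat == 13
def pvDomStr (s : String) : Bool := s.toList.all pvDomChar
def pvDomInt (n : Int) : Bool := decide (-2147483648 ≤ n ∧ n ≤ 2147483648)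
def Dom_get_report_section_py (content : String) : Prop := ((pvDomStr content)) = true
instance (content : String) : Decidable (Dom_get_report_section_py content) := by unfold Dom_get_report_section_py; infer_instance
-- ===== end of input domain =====

-- B finds the section bounds (start index, then kept-line count) and slices once,
-- instead of A's stateful accumulate-with-flag loop; objective: alternative decomposition.

-- shared transliterations of the two Python source conditions
-- '"Report output:" in line'
def pvContains (l : String) : Bool := PySem.Str.isIn "Report output:" l
-- 'stripped.startswith("#") or (stripped and stripped[0].isdigit() and "." in stripped[:4])'
def pvBoundary (l : String) : Bool :=
  let stripped := PySem.Str.strip l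
  PySem.Str.startswith stripped "#" ||
    (!(stripped == "") &&
      (match PySem.Str.pyGet? stripped 0 with
       | some c => PySem.Chars.isdigit c
       | none => false) &&
      PySem.Str.isIn "." (PySem.Str.slice stripped none (some 4)))

-- ===== PORT A =====
-- the for-loop with in_section flag, section_lines accumulator and break
def pvLoopA : List String → Bool → List String → List String
  | [], _, acc => acc
  | l :: ls, ins, acc =>
    if pvContains l then pvLoopA ls true (acc ++ [l])
    else if ins then
      (if pvBoundary l then acc else pvLoopA ls true (acc ++ [l]))
    else pvLoopA ls false acc

def get_report_section_py (content : String) : String :=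
  PySem.Str.join "\n" (pvLoopA (PySem.Str.splitlines content) false [])

-- ===== PORT B =====
-- first loop of Source B: index of the first line containing the marker
def pvFindStart : List String → Nat → Option Nat
  | [], _ => none
  | l :: ls, i => if pvContains l then some i else pvFindStart ls (i + 1)

-- second loop of Source B: how many lines after the start are kept before the break
def pvCount : List String → Nat
  | [] => 0
  | l :: ls => if !pvContains l && pvBoundary l then 0 else pvCount ls + 1

def get_report_section_py_alt (content : String) : String :=
  let lines := PySem.Str.splitlines content
  match pvFindStart lines 0 with
  | none => ""
  | some start =>
    let n := pvCount (PySem.List.slice lines (some ((start : Int) + 1)) none)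
    PySem.Str.join "\n" (PySem.List.slice lines (some (start : Int)) (some ((start : Int) + 1 + (n : Int))))

-- ===== PRECONDITION & SPEC =====
def Spec_get_report_section_py (content : String) (out : String) : Prop := out = get_report_section_py_alt content
instance (content : String) (out : String) : Decidable (Spec_get_report_section_py content out) := by unfold Spec_get_report_section_py; infer_instance

-- ===== CLAIM (what is proved, stated in full; the proofs are below) =====
def Claim_equal_get_report_section_py : Prop := ∀ (content : String), Dom_get_report_section_py content → Spec_get_report_section_py content (get_report_section_py content)

-- ===== LEMMAS AND PROOFS =====

-- the kept-line predicate after the section has started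
def pvKeep (l : String) : Bool := pvContains l || !pvBoundary l

lemma pvLoopA_true (ls : List String) : ∀ acc,
    pvLoopA ls true acc = acc ++ ls.takeWhile pvKeep := by
  induction ls with
  | nil => intro acc; simp [pvLoopA]
  | cons l ls ih =>
    intro acc
    by_cases hc : pvContains l = true
    · simp [pvLoopA, hc, pvKeep, ih]
    · by_cases hb : pvBoundary l = true
      · simp [pvLoopA, hc, hb, pvKeep]
      · simp [pvLoopA, hc, hb, pvKeep, ih]

lemma pvCount_eq (ls : List String) : pvCount ls = (ls.takeWhile pvKeep).length := by
  induction ls with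
  | nil => rfl
  | cons l ls ih =>
    by_cases hc : pvContains l = true
    · simp [pvCount, hc, pvKeep, ih]
    · by_cases hb : pvBoundary l = true
      · simp [pvCount, hc, hb, pvKeep]
      · simp [pvCount, hc, hb, pvKeep, ih]

lemma pvFindStart_shift (ls : List String) : ∀ i,
    pvFindStart ls i = (pvFindStart ls 0).map (· + i) := by
  induction ls with
  | nil => intro i; rfl
  | cons l ls ih =>
    intro i
    by_cases hc : pvContains l = true
    · simp [pvFindStart, hc]
    · simp [pvFindStart, hc, ih (i + 1), ih 1, Option.map_map]
      congr 1; funext j; omega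

-- dropping the head of the line list shifts both of B's slices by one
lemma pvSlice_none_cons (l : String) (ls : List String) (c : Int) (h : 0 ≤ c) :
    PySem.List.slice (l :: ls) (some (c + 1)) none = PySem.List.slice ls (some c) none := by
  rw [PySem.List.slice_from _ (by omega), PySem.List.slice_from _ h]
  have : (c + 1).toNat = c.toNat + 1 := by omega
  simp [this]

lemma pvSlice_cons (l : String) (ls : List String) (c d : Int) (h : 0 ≤ c) (h' : 0 ≤ d) :
    PySem.List.slice (l :: ls) (some (c + 1)) (some (d + 1)) =
      PySem.List.slice ls (some c) (some d) := by
  rw [show c + 1 = ((c.toNat + 1 : Nat) : Int) by omega,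
      show d + 1 = ((d.toNat + 1 : Nat) : Int) by omega,
      show c = ((c.toNat : Nat) : Int) by omega,
      show d = ((d.toNat : Nat) : Int) by omega,
      PySem.List.slice_natCast, PySem.List.slice_natCast]
  rw [List.drop_succ_cons]
  congr 1
  omega

-- B's slice of lines [start : start+1+n] as take/drop
lemma pvSlice_window (ls : List String) (i n : Nat) :
    PySem.List.slice ls (some (i : Int)) (some ((i : Int) + 1 + (n : Int))) =
      (ls.drop i).take (n + 1) := by
  have h : ((i : Int) + 1 + (n : Int)) = ((i + 1 + n : Nat) : Int) := by push_cast; ring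
  rw [h, PySem.List.slice_natCast]
  congr 1; omega

-- the body of B applied to an explicit line list
def pvAltB (ls : List String) : String :=
  match pvFindStart ls 0 with
  | none => ""
  | some start =>
    let n := pvCount (PySem.List.slice ls (some ((start : Int) + 1)) none)
    PySem.Str.join "\n" (PySem.List.slice ls (some (start : Int)) (some ((start : Int) + 1 + (n : Int))))

lemma pvMain (ls : List String) : pvAltB ls = PySem.Str.join "\n" (pvLoopA ls false []) := by
  induction ls with
  | nil => decide
  | cons l ls ih =>
    by_cases hc : pvContains l = true
    · -- the head starts the section
      have hd : PySem.List.slice (l :: ls) (some (((0 : Nat) : Int) + 1)) none = ls := by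
        rw [show (((0 : Nat) : Int)) = (0 : Int) by norm_num, pvSlice_none_cons l ls 0 le_rfl, PySem.List.slice_from _ le_rfl]
        simp
      simp only [pvAltB, pvFindStart, hc, if_pos, hd]
      rw [pvSlice_window (l :: ls) 0 _, pvCount_eq]
      simp only [List.drop_zero, List.take_succ_cons,
        ← List.prefix_iff_eq_take.mp (List.takeWhile_prefix pvKeep)]
      simp [pvLoopA, hc, pvLoopA_true]
    · -- the head is skipped by both sides
      have hA : pvLoopA (l :: ls) false [] = pvLoopA ls false [] := by
        simp [pvLoopA, hc]
      rw [hA, ← ih]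
      simp only [pvAltB, pvFindStart, hc, Bool.false_eq_true, if_false,
        pvFindStart_shift ls 1]
      cases h0 : pvFindStart ls 0 with
      | none => simp
      | some j =>
        simp only [Option.map_some]
        rw [show ((j + 1 : Nat) : Int) = (j : Int) + 1 by push_cast; ring]
        rw [show (j : Int) + 1 + 1 = ((j : Int) + 1) + 1 from rfl,
          pvSlice_none_cons l ls ((j : Int) + 1) (by positivity)]
        set n := pvCount (PySem.List.slice ls (some ((j : Int) + 1)) none) with hn
        rw [show (j : Int) + 1 + 1 + (n : Int) = ((j : Int) + 1 + (n : Int)) + 1 by ring,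
          pvSlice_cons l ls (j : Int) ((j : Int) + 1 + (n : Int)) (by positivity) (by positivity)]

-- ===== VERDICT (by name: the statement is the Claim_ definition above) =====
theorem get_report_section_py_spec : Claim_equal_get_report_section_py := by
  intro content _
  unfold Spec_get_report_section_py get_report_section_py get_report_section_py_alt
  exact (pvMain (PySem.Str.splitlines content)).symm
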